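-- pv_equiv track=rewrite | github.com/BoulleeAlicia/Wumpus | wumpusfinal.py | compute_stench
-- ===== SOURCE A (Python) =====
-- from typing import Dict, Tuple, List, Union
--
-- def compute_stench(world: List[List[str]], n: int) -> List[List[str]]:
--     for i in range(n):
--         for j in range(n):
--             if "W" in world[i][j]:
--                 if i + 1 < n and "S" not in world[i + 1][j]:
--                     world[i + 1][j] += "S"
--                 if j + 1 < n and "S" not in world[i][j + 1]:
--                     world[i][j + 1] += "S"
--                 if i - 1 >= 0 and "S" not in world[i - 1][j]:
--                     world[i - 1][j] += "S"
--                 if j - 1 >= 0 and "S" not in world[i][j - 1]: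
--                     world[i][j - 1] += "S"
--     return world
-- ===== SOURCE B (Python) =====
-- def compute_stench(world, n):
--     # Gather pass: each cell looks at its four in-bounds neighbors for a Wumpus,
--     # instead of each Wumpus scattering stench into its neighbors.
--     # Builds a new grid (A mutates in place); return values agree.
--     def has_w(i, j):
--         return 0 <= i < n and 0 <= j < n and "W" in world[i][j]
--
--     return [
--         [cell + "S"
--          if i < n and j < n and "S" not in cell
--             and (has_w(i + 1, j) or has_w(i - 1, j) or has_w(i, j + 1) or has_w(i, j - 1))
--          else cell
--          for j, cell in enumerate(row)]
--         for i, row in enumerate(world)]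
-- ===== Notes on version B (the rewrite author's own statement) =====
-- stated objective: alternative
-- what changed: Inverts A's scatter (each Wumpus cell writes 'S' into its mutable neighbors, in place) into a pure gather (each cell reads its four in-bounds neighbors for 'W' and a new grid is built), removing all in-place mutation.
import Mathlib
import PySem

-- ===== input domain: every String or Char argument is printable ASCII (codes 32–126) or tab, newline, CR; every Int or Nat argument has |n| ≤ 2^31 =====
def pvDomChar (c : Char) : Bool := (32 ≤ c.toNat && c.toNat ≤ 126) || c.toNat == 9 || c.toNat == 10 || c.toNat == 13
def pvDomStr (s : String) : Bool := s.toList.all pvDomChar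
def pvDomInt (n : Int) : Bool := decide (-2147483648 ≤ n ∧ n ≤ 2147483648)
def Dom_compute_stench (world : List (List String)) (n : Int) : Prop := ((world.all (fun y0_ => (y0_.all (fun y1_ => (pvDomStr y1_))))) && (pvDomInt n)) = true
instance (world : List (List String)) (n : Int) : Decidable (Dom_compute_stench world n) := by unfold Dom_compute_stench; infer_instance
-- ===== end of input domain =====

-- B replaces A's in-place scatter (each Wumpus cell appends "S" to its neighbors) by a pure
-- gather (each cell checks its four in-bounds neighbors for "W"); A mutates `world` in place
-- and returns it, B builds a new grid — the equivalence proved is about the return value.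

-- ===== PORT A =====
-- world[i][j] (read); total form, exact under Pre_ (all indices used are in range there)
def cellAt (g : List (List String)) (i j : Int) : String :=
  PySem.List.pyGetD (PySem.List.pyGetD g i []) j ""

-- world[i][j] += "S"
def putS (g : List (List String)) (i j : Int) : List (List String) :=
  PySem.List.pySetD g i
    (PySem.List.pySetD (PySem.List.pyGetD g i []) j (PySem.Str.join "" [cellAt g i j, "S"]))

-- the body of A's inner loop for one (i, j)
-- "if COND and 'S' not in world[x][y]: world[x][y] += 'S'" (one guarded line of A)
def mark1 (g : List (List String)) (C : Prop) [Decidable C] (i j : Int) : List (List String) :=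
  if C ∧ PySem.Str.isIn "S" (cellAt g i j) = false then putS g i j else g

def stepA (n : Int) (g : List (List String)) (i j : Int) : List (List String) :=
  if PySem.Str.isIn "W" (cellAt g i j) then
    mark1 (mark1 (mark1 (mark1 g (i + 1 < n) (i + 1) j)
      (j + 1 < n) i (j + 1)) (i - 1 ≥ 0) (i - 1) j) (j - 1 ≥ 0) i (j - 1)
  else g

def compute_stench (world : List (List String)) (n : Int) : List (List String) :=
  (PySem.List.pyRange 0 n 1).foldl (fun g i =>
    (PySem.List.pyRange 0 n 1).foldl (fun g j => stepA n g i j) g) world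

-- ===== PORT B =====
-- has_w(i, j) of Source B
def nbW (world : List (List String)) (n i j : Int) : Bool :=
  decide (0 ≤ i) && decide (i < n) && decide (0 ≤ j) && decide (j < n) &&
    PySem.Str.isIn "W" (cellAt world i j)

def compute_stench_alt (world : List (List String)) (n : Int) : List (List String) :=
  (PySem.List.enumerate world).map (fun ir =>
    (PySem.List.enumerate ir.2).map (fun jc =>
      if decide (ir.1 < n) && decide (jc.1 < n) && !PySem.Str.isIn "S" jc.2 &&
          (nbW world n (ir.1 + 1) jc.1 || nbW world n (ir.1 - 1) jc.1 ||
           nbW world n ir.1 (jc.1 + 1) || nbW world n ir.1 (jc.1 - 1))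
      then PySem.Str.join "" [jc.2, "S"] else jc.2))

-- ===== PRECONDITION & SPEC =====
-- A reads world[i][j] for every 0 ≤ i, j < n, so it raises IndexError unless the grid has at
-- least n rows whose first n each have at least n entries; Pre_ is exactly that.
def Pre_compute_stench (world : List (List String)) (n : Int) : Prop :=
  n ≤ (world.length : Int) ∧ ∀ r ∈ world.take n.toNat, n ≤ (r.length : Int)
instance (world : List (List String)) (n : Int) : Decidable (Pre_compute_stench world n) := by
  unfold Pre_compute_stench; infer_instance

def pvWitness_compute_stench : List (List String) × Int := ([["W", ""], ["", "P"]], 2)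

def Spec_compute_stench (world : List (List String)) (n : Int) (out : List (List String)) : Prop := out = compute_stench_alt world n
instance (world : List (List String)) (n : Int) (out : List (List String)) : Decidable (Spec_compute_stench world n out) := by unfold Spec_compute_stench; infer_instance

-- ===== CLAIM (what is proved, stated in full; the proofs are below) =====
def Claim_equal_compute_stench : Prop := ∀ (world : List (List String)) (n : Int), Dom_compute_stench world n → Pre_compute_stench world n → Spec_compute_stench world n (compute_stench world n)

-- ===== LEMMAS AND PROOFS =====

def sApp (c : String) : String := PySem.Str.join "" [c, "S"]

lemma infix_singleton (a : Char) (l : List Char) : [a] <:+: l ↔ a ∈ l := by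
  constructor
  · intro h; exact (List.singleton_sublist).1 h.sublist
  · intro h; obtain ⟨p, q, rfl⟩ := List.mem_iff_append.1 h; exact ⟨p, q, by simp⟩

lemma toList_sApp (s : String) : (sApp s).toList = s.toList ++ ['S'] := by
  simp [sApp, PySem.Str.toList_join, PySem.Chars.join_cons_cons, PySem.Chars.join_singleton]

lemma isIn_W_sApp (s : String) : PySem.Str.isIn "W" (sApp s) = PySem.Str.isIn "W" s := by
  apply Bool.eq_iff_iff.mpr
  rw [PySem.Str.isIn_iff_infix, PySem.Str.isIn_iff_infix, toList_sApp]
  show ['W'] <:+: _ ↔ ['W'] <:+: _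
  rw [infix_singleton, infix_singleton]
  simp

lemma isIn_S_sApp (s : String) : PySem.Str.isIn "S" (sApp s) = true := by
  rw [PySem.Str.isIn_iff_infix, toList_sApp]
  show ['S'] <:+: _
  rw [infix_singleton]; simp

def gmap (w : List (List String)) (f : Int → Int → String → String) : List (List String) :=
  (PySem.List.enumerate w).map (fun ir =>
    (PySem.List.enumerate ir.2).map (fun jc => f ir.1 jc.1 jc.2))

lemma length_gmap (w f) : (gmap w f).length = w.length := by
  simp [gmap, PySem.List.length_enumerate]

lemma getElem_gmap_row (w f) (i : Nat) (hi : i < w.length) :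
    (gmap w f)[i]'(by rwa [length_gmap]) =
      (PySem.List.enumerate (w[i])).map (fun jc => f i jc.1 jc.2) := by
  simp [gmap, PySem.List.getElem_enumerate]

lemma rowlen_gmap (w f) (i : Nat) (hi : i < w.length) :
    ((gmap w f)[i]'(by rwa [length_gmap])).length = (w[i]).length := by
  rw [getElem_gmap_row w f i hi]; simp [PySem.List.length_enumerate]

lemma getElem_gmap (w f) (i j : Nat) (hi : i < w.length) (hj : j < (w[i]).length) :
    ((gmap w f)[i]'(by rwa [length_gmap]))[j]'(by rw [rowlen_gmap w f i hi]; exact hj) =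
      f i j (w[i][j]) := by
  simp [getElem_gmap_row w f i hi, PySem.List.getElem_enumerate]

lemma grid_ext {g h : List (List String)} (hl : g.length = h.length)
    (hrl : ∀ (i : Nat) (h1 : i < g.length), (g[i]).length = (h[i]'(hl ▸ h1)).length)
    (hc : ∀ (i j : Nat) (h1 : i < g.length) (hj1 : j < (g[i]).length),
        g[i][j] = (h[i]'(hl ▸ h1))[j]'(hrl i h1 ▸ hj1)) : g = h := by
  apply List.ext_getElem hl
  intro i h1 h2
  apply List.ext_getElem (hrl i h1)
  intro j hj1 hj2
  exact hc i j h1 hj1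

lemma cellAt_eq_getElem (g : List (List String)) (i j : Nat) (hi : i < g.length)
    (hj : j < (g[i]).length) : cellAt g i j = g[i][j] := by
  simp [cellAt, hi, hj]



lemma cellAt_int (g : List (List String)) (a b : Int) (h0a : 0 ≤ a) (h0b : 0 ≤ b)
    (ha : a.toNat < g.length) (hb : b.toNat < (g[a.toNat]).length) :
    cellAt g a b = g[a.toNat][b.toNat] := by
  have h1 : a = ((a.toNat : Nat) : Int) := by omega
  have h2 : b = ((b.toNat : Nat) : Int) := by omega
  conv_lhs => rw [h1, h2]
  exact cellAt_eq_getElem g a.toNat b.toNat ha hb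

lemma putS_eq_set (g : List (List String)) (a b : Int) (h0a : 0 ≤ a) (h0b : 0 ≤ b)
    (ha : a.toNat < g.length) (hb : b.toNat < (g[a.toNat]).length) :
    putS g a b = g.set a.toNat ((g[a.toNat]).set b.toNat (sApp (g[a.toNat][b.toNat]))) := by
  rw [putS, PySem.List.pySetD_of_nonneg _ _ h0a, PySem.List.pySetD_of_nonneg _ _ h0b]
  rw [cellAt_int g a b h0a h0b ha hb,
    PySem.List.pyGetD_eq_getElem g [] h0a (by omega)]
  rfl

def applyMarks (w : List (List String)) (m : Int → Int → Bool) : List (List String) :=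
  gmap w (fun i j c => if m i j then sApp c else c)

lemma applyMarks_false (w : List (List String)) : applyMarks w (fun _ _ => false) = w := by
  simp only [applyMarks, gmap, if_neg Bool.false_ne_true]
  rw [List.map_congr_left (fun ir _ => PySem.List.map_snd_enumerate ir.2 0)]
  exact PySem.List.map_snd_enumerate w 0

lemma length_applyMarks (w m) : (applyMarks w m).length = w.length := length_gmap w _

lemma rowlen_applyMarks (w m) (i : Nat) (hi : i < w.length) :
    ((applyMarks w m)[i]'(by rwa [length_applyMarks])).length = (w[i]).length :=
  rowlen_gmap w _ i hi

lemma cellAt_applyMarks (w m) (a b : Int) (h0a : 0 ≤ a) (h0b : 0 ≤ b)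
    (ha : a.toNat < w.length) (hb : b.toNat < (w[a.toNat]).length) :
    cellAt (applyMarks w m) a b = if m a b then sApp (cellAt w a b) else cellAt w a b := by
  have ha' : a.toNat < (applyMarks w m).length := by rwa [length_applyMarks]
  have hb' : b.toNat < ((applyMarks w m)[a.toNat]).length := by
    rw [rowlen_applyMarks w m a.toNat ha]; exact hb
  rw [cellAt_int _ a b h0a h0b ha' hb', cellAt_int w a b h0a h0b ha hb]
  have := getElem_gmap w (fun i j c => if m i j then sApp c else c) a.toNat b.toNat ha hb
  simp only [applyMarks]
  rw [this]
  rw [Int.toNat_of_nonneg h0a, Int.toNat_of_nonneg h0b]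

lemma getElem_applyMarks (w m) (i j : Nat) (hi : i < w.length) (hj : j < (w[i]).length) :
    ((applyMarks w m)[i]'(by rwa [length_applyMarks]))[j]'(by rw [rowlen_applyMarks w m i hi]; exact hj) =
      if m i j then sApp (w[i][j]) else w[i][j] :=
  getElem_gmap w _ i j hi hj

lemma applyMarks_congr (w : List (List String)) {m1 m2 : Int → Int → Bool}
    (h : ∀ (i j : Nat) (hi : i < w.length), j < (w[i]).length → m1 i j = m2 i j) :
    applyMarks w m1 = applyMarks w m2 := by
  refine grid_ext (by rw [length_applyMarks, length_applyMarks]) ?_ ?_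
  · intro i h1
    have hi : i < w.length := by rwa [length_applyMarks] at h1
    rw [rowlen_applyMarks w m1 i hi, rowlen_applyMarks w m2 i hi]
  · intro i j h1 hj1
    have hi : i < w.length := by rwa [length_applyMarks] at h1
    have hj : j < (w[i]).length := by rwa [rowlen_applyMarks w m1 i hi] at hj1
    rw [getElem_applyMarks w m1 i j hi hj, getElem_applyMarks w m2 i j hi hj, h i j hi hj]


lemma condPut (w : List (List String)) (m : Int → Int → Bool) (a b : Int)
    (h0a : 0 ≤ a) (h0b : 0 ≤ b) (ha : a.toNat < w.length) (hb : b.toNat < (w[a.toNat]).length) :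
    (if PySem.Str.isIn "S" (cellAt (applyMarks w m) a b) = false
     then putS (applyMarks w m) a b else applyMarks w m) =
      applyMarks w (fun i j => m i j || (i == a && j == b && !PySem.Str.isIn "S" (cellAt w a b))) := by
  have hcell := cellAt_applyMarks w m a b h0a h0b ha hb
  by_cases hS : PySem.Str.isIn "S" (cellAt w a b) = true
  · have : PySem.Str.isIn "S" (cellAt (applyMarks w m) a b) = true := by
      rw [hcell]; split_ifs with h
      · exact isIn_S_sApp _
      · exact hS
    rw [if_neg (by rw [this]; simp)]
    apply applyMarks_congr
    intro i j _ _
    simp only [hS, Bool.not_true, Bool.and_false, Bool.or_false]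
  · replace hS : PySem.Str.isIn "S" (cellAt w a b) = false := by simpa using hS
    by_cases hm : m a b = true
    · have : PySem.Str.isIn "S" (cellAt (applyMarks w m) a b) = true := by
        rw [hcell, if_pos hm]; exact isIn_S_sApp _
      rw [if_neg (by rw [this]; simp)]
      apply applyMarks_congr
      intro i j _ _
      by_cases h1 : (i : Int) = a
      · by_cases h2 : (j : Int) = b
        · subst h1; subst h2; rw [hm]; simp
        · have h2' : ((j : Int) == b) = false := by simpa using h2
          simp only [h2', Bool.and_false, Bool.false_and, Bool.or_false]
      · have h1' : ((i : Int) == a) = false := by simpa using h1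
        simp only [h1', Bool.false_and, Bool.or_false]
    · replace hm : m a b = false := by simpa using hm
      have hS' : PySem.Str.isIn "S" (cellAt (applyMarks w m) a b) = false := by
        rw [hcell, if_neg (by simp [hm]), hS]
      rw [if_pos hS']
      have ha' : a.toNat < (applyMarks w m).length := by rwa [length_applyMarks]
      have hb' : b.toNat < ((applyMarks w m)[a.toNat]).length := by
        rw [rowlen_applyMarks w m a.toNat ha]; exact hb
      rw [putS_eq_set _ a b h0a h0b ha' hb']
      have hcc : (applyMarks w m)[a.toNat][b.toNat] = w[a.toNat][b.toNat] := by
        rw [getElem_applyMarks w m a.toNat b.toNat ha hb]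
        rw [if_neg (by rw [Int.toNat_of_nonneg h0a, Int.toNat_of_nonneg h0b]; simp [hm])]
      refine grid_ext (by simp [length_applyMarks]) ?_ ?_
      · intro i h1
        simp only [List.length_set] at h1
        have hi : i < w.length := by rwa [length_applyMarks] at h1
        simp only [List.getElem_set]
        by_cases hia : a.toNat = i
        · subst hia
          rw [if_pos rfl, List.length_set, rowlen_applyMarks w m a.toNat ha,
            rowlen_applyMarks w _ a.toNat ha]
        · rw [if_neg hia, rowlen_applyMarks w m i hi, rowlen_applyMarks w _ i hi]
      · intro i j h1 hj1
        simp only [List.length_set] at h1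
        have hi : i < w.length := by rwa [length_applyMarks] at h1
        by_cases hia : a.toNat = i
        · subst hia
          have hj : j < (w[a.toNat]).length := by
            simpa [List.getElem_set_self, List.length_set,
              rowlen_applyMarks w m a.toNat ha] using hj1
          simp only [List.getElem_set_self]
          by_cases hjb : b.toNat = j
          · subst hjb
            simp only [List.getElem_set_self, hcc]
            rw [getElem_applyMarks w _ a.toNat b.toNat ha hb]
            rw [if_pos (by
              rw [Int.toNat_of_nonneg h0a, Int.toNat_of_nonneg h0b]
              simp only [hm, beq_self_eq_true, Bool.and_self, Bool.true_and, Bool.false_or]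
              simpa using hS)]
          · simp only [List.getElem_set_ne hjb]
            rw [getElem_applyMarks w m a.toNat j ha hj,
              getElem_applyMarks w _ a.toNat j ha hj]
            have hne : ((j : Int) == b) = false := by
              simp only [beq_eq_false_iff_ne, ne_eq]; omega
            simp only [hne, Bool.and_false, Bool.false_and, Bool.or_false]
        · simp only [List.getElem_set_ne hia]
          have hj : j < (w[i]).length := by
            have := hj1
            simp only [List.getElem_set_ne hia] at this
            rwa [rowlen_applyMarks w m i hi] at this
          rw [getElem_applyMarks w m i j hi hj, getElem_applyMarks w _ i j hi hj]
          have hne : ((i : Int) == a) = false := by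
            simp only [beq_eq_false_iff_ne, ne_eq]; omega
          simp only [hne, Bool.false_and, Bool.or_false]


def adjB (a b i j : Int) : Bool :=
  (i == a + 1 && j == b) || (i == a && j == b + 1) || (i == a - 1 && j == b) || (i == a && j == b - 1)

def inbB (n i j : Int) : Bool := decide (0 ≤ i) && decide (i < n) && decide (0 ≤ j) && decide (j < n)

lemma pre_row (w : List (List String)) (n : Int) (hpre : Pre_compute_stench w n)
    (x : Int) (h0 : 0 ≤ x) (hx : x < n) : x.toNat < w.length := by
  have := hpre.1; omega

lemma pre_col (w : List (List String)) (n : Int) (hpre : Pre_compute_stench w n)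
    (x : Int) (h0 : 0 ≤ x) (hx : x < n) :
    n ≤ (((w[x.toNat]'(pre_row w n hpre x h0 hx)).length : Nat) : Int) := by
  have hlt : x.toNat < (w.take n.toNat).length := by
    rw [List.length_take]; have := hpre.1; omega
  have hmem : (w.take n.toNat)[x.toNat]'hlt ∈ w.take n.toNat := List.getElem_mem hlt
  have heq : (w.take n.toNat)[x.toNat]'hlt = w[x.toNat]'(pre_row w n hpre x h0 hx) :=
    List.getElem_take
  rw [heq] at hmem
  exact hpre.2 _ hmem

lemma tpoint (w : List (List String)) (n x y i j : Int) :
    (inbB n x y && (i == x && j == y && !PySem.Str.isIn "S" (cellAt w x y))) =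
      (inbB n i j && !PySem.Str.isIn "S" (cellAt w i j) && (i == x && j == y)) := by
  by_cases h1 : i = x
  · subst h1
    by_cases h2 : j = y
    · subst h2
      simp [Bool.and_comm]
    · have hne : (j == y) = false := beq_eq_false_iff_ne.mpr h2
      simp [hne]
  · have hne : (i == x) = false := beq_eq_false_iff_ne.mpr h1
    simp [hne]

lemma or_four_distrib (m A e1 e2 e3 e4 : Bool) :
    (m || (A && e1) || (A && e2) || (A && e3) || (A && e4)) = (m || (A && (e1 || e2 || e3 || e4))) := by
  cases A <;> cases m <;> simp

lemma condNbr (w : List (List String)) (n : Int) (hpre : Pre_compute_stench w n)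
    (m : Int → Int → Bool) (x y : Int) (C : Prop) [Decidable C]
    (hC : C ↔ inbB n x y = true) :
    mark1 (applyMarks w m) C x y =
      applyMarks w (fun i j => m i j ||
        (inbB n x y && (i == x && j == y && !PySem.Str.isIn "S" (cellAt w x y)))) := by
  by_cases hin : inbB n x y = true
  · have h' := hin
    simp only [inbB, Bool.and_eq_true, decide_eq_true_eq] at h'
    obtain ⟨⟨⟨h0x, hxn⟩, h0y⟩, hyn⟩ := h'
    have hx : x.toNat < w.length := pre_row w n hpre x h0x hxn
    have hy : y.toNat < (w[x.toNat]).length := by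
      have := pre_col w n hpre x h0x hxn; omega
    have hiff : (C ∧ PySem.Str.isIn "S" (cellAt (applyMarks w m) x y) = false) ↔
        (PySem.Str.isIn "S" (cellAt (applyMarks w m) x y) = false) :=
      and_iff_right (hC.mpr hin)
    rw [mark1, if_congr hiff rfl rfl, condPut w m x y h0x h0y hx hy]
    apply applyMarks_congr
    intro i j _ _
    rw [hin, Bool.true_and]
  · rw [mark1, if_neg (fun h => hin (hC.mp h.1))]
    apply applyMarks_congr
    intro i j _ _
    have hin' : inbB n x y = false := by simpa using hin
    rw [hin', Bool.false_and, Bool.or_false]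

lemma stepA_applyMarks (w : List (List String)) (n : Int) (hpre : Pre_compute_stench w n)
    (m : Int → Int → Bool) (a b : Int) (hab : inbB n a b = true) :
    stepA n (applyMarks w m) a b =
      applyMarks w (fun i j => m i j ||
        (PySem.Str.isIn "W" (cellAt w a b) && inbB n i j &&
         !PySem.Str.isIn "S" (cellAt w i j) && adjB a b i j)) := by
  have h' := hab
  simp only [inbB, Bool.and_eq_true, decide_eq_true_eq] at h'
  obtain ⟨⟨⟨h0a, han⟩, h0b⟩, hbn⟩ := h'
  have ha : a.toNat < w.length := pre_row w n hpre a h0a han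
  have hb : b.toNat < (w[a.toNat]).length := by
    have := pre_col w n hpre a h0a han; omega
  have hW : PySem.Str.isIn "W" (cellAt (applyMarks w m) a b) = PySem.Str.isIn "W" (cellAt w a b) := by
    rw [cellAt_applyMarks w m a b h0a h0b ha hb]
    split_ifs with h
    · exact isIn_W_sApp _
    · rfl
  rw [stepA, hW]
  by_cases hWv : PySem.Str.isIn "W" (cellAt w a b) = true
  · rw [if_pos hWv]
    rw [condNbr w n hpre m (a + 1) b _ (by
      constructor
      · intro h; simp only [inbB, Bool.and_eq_true, decide_eq_true_eq]; omega
      · intro h; simp only [inbB, Bool.and_eq_true, decide_eq_true_eq] at h; omega)]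
    rw [condNbr w n hpre _ a (b + 1) _ (by
      constructor
      · intro h; simp only [inbB, Bool.and_eq_true, decide_eq_true_eq]; omega
      · intro h; simp only [inbB, Bool.and_eq_true, decide_eq_true_eq] at h; omega)]
    rw [condNbr w n hpre _ (a - 1) b _ (by
      constructor
      · intro h; simp only [inbB, Bool.and_eq_true, decide_eq_true_eq]; omega
      · intro h; simp only [inbB, Bool.and_eq_true, decide_eq_true_eq] at h; omega)]
    rw [condNbr w n hpre _ a (b - 1) _ (by
      constructor
      · intro h; simp only [inbB, Bool.and_eq_true, decide_eq_true_eq]; omega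
      · intro h; simp only [inbB, Bool.and_eq_true, decide_eq_true_eq] at h; omega)]
    apply applyMarks_congr
    intro i j _ _
    rw [tpoint w n (a + 1) b i j, tpoint w n a (b + 1) i j, tpoint w n (a - 1) b i j,
      tpoint w n a (b - 1) i j, or_four_distrib, hWv, Bool.true_and, adjB, Bool.and_assoc]
  · have hWf : PySem.Str.isIn "W" (cellAt w a b) = false := by simpa using hWv
    rw [if_neg (by rw [hWf]; simp)]
    apply applyMarks_congr
    intro i j _ _
    rw [hWf, Bool.false_and, Bool.false_and, Bool.false_and, Bool.or_false]

def marksOf (w : List (List String)) (n : Int) (L : List (Int × Int)) (i j : Int) : Bool :=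
  inbB n i j && !PySem.Str.isIn "S" (cellAt w i j) &&
    L.any (fun p => PySem.Str.isIn "W" (cellAt w p.1 p.2) && adjB p.1 p.2 i j)

lemma foldl_stepA (w : List (List String)) (n : Int) (hpre : Pre_compute_stench w n)
    (L : List (Int × Int)) (hL : ∀ p ∈ L, inbB n p.1 p.2 = true) (m : Int → Int → Bool) :
    L.foldl (fun g p => stepA n g p.1 p.2) (applyMarks w m) =
      applyMarks w (fun i j => m i j || marksOf w n L i j) := by
  induction L generalizing m with
  | nil =>
    rw [List.foldl_nil]
    apply applyMarks_congr
    intro i j _ _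
    simp [marksOf]
  | cons p L ih =>
    rw [List.foldl_cons, stepA_applyMarks w n hpre m p.1 p.2 (hL p (List.mem_cons_self))]
    rw [ih (fun q hq => hL q (List.mem_cons_of_mem p hq))]
    apply applyMarks_congr
    intro i j _ _
    simp only [marksOf, List.any_cons]
    cases hW' : PySem.Str.isIn "W" (cellAt w p.1 p.2) <;>
      cases hA : adjB p.1 p.2 (i : Int) (j : Int) <;>
      cases hI : inbB n (i : Int) (j : Int) <;>
      cases hs : PySem.Str.isIn "S" (cellAt w (i : Int) (j : Int)) <;>
      cases hm : m (i : Int) (j : Int) <;> simp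

lemma foldl_pairs {α β γ : Type} (is : List α) (js : List β) (f : γ → α → β → γ) (g0 : γ) :
    is.foldl (fun g i => js.foldl (fun g j => f g i j) g) g0 =
      (is.flatMap (fun i => js.map (fun j => (i, j)))).foldl (fun g p => f g p.1 p.2) g0 := by
  induction is generalizing g0 with
  | nil => rfl
  | cons x xs ih => simp [List.foldl_append, List.foldl_map, ih]

def ptsOf (n : Int) : List (Int × Int) :=
  (PySem.List.pyRange 0 n 1).flatMap (fun i => (PySem.List.pyRange 0 n 1).map (fun j => (i, j)))

lemma mem_ptsOf (n : Int) (p : Int × Int) :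
    p ∈ ptsOf n ↔ 0 ≤ p.1 ∧ p.1 < n ∧ 0 ≤ p.2 ∧ p.2 < n := by
  obtain ⟨x, y⟩ := p
  simp only [ptsOf, List.mem_flatMap, List.mem_map, PySem.List.mem_pyRange_one]
  constructor
  · rintro ⟨i, hi, j, hj, heq⟩
    obtain ⟨rfl, rfl⟩ : i = x ∧ j = y := by
      rw [Prod.mk.injEq] at heq; exact ⟨heq.1, heq.2⟩
    exact ⟨hi.1, hi.2, hj.1, hj.2⟩
  · rintro ⟨h1, h2, h3, h4⟩
    exact ⟨x, ⟨h1, h2⟩, y, ⟨h3, h4⟩, rfl⟩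

lemma hmem_ptsOf (n : Int) : ∀ p ∈ ptsOf n, inbB n p.1 p.2 = true := by
  intro p hp
  rw [mem_ptsOf] at hp
  simp only [inbB, Bool.and_eq_true, decide_eq_true_eq]
  exact ⟨⟨⟨hp.1, hp.2.1⟩, hp.2.2.1⟩, hp.2.2.2⟩

lemma A_eq_marks (w : List (List String)) (n : Int) (hpre : Pre_compute_stench w n) :
    compute_stench w n = applyMarks w (fun i j => marksOf w n (ptsOf n) i j) := by
  calc compute_stench w n
      = (ptsOf n).foldl (fun g p => stepA n g p.1 p.2) w := by
        rw [compute_stench]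
        exact foldl_pairs (PySem.List.pyRange 0 n 1) (PySem.List.pyRange 0 n 1)
          (fun g i j => stepA n g i j) w
    _ = (ptsOf n).foldl (fun g p => stepA n g p.1 p.2) (applyMarks w (fun _ _ => false)) := by
        rw [applyMarks_false]
    _ = applyMarks w (fun i j => false || marksOf w n (ptsOf n) i j) :=
        foldl_stepA w n hpre (ptsOf n) (hmem_ptsOf n) _
    _ = applyMarks w (fun i j => marksOf w n (ptsOf n) i j) := by
        apply applyMarks_congr; intro i j _ _; rw [Bool.false_or]

lemma cond_pointwise (w : List (List String)) (n : Int) (i j : Nat)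
    (hi : i < w.length) (hj : j < (w[i]).length) :
    (decide ((i : Int) < n) && decide ((j : Int) < n) && !PySem.Str.isIn "S" (w[i][j]) &&
      (nbW w n ((i : Int) + 1) j || nbW w n ((i : Int) - 1) j ||
       nbW w n i ((j : Int) + 1) || nbW w n i ((j : Int) - 1))) =
      marksOf w n (ptsOf n) i j := by
  rw [← cellAt_eq_getElem w i j hi hj]
  apply Bool.eq_iff_iff.mpr
  simp only [marksOf, inbB, nbW, adjB, Bool.and_eq_true, Bool.or_eq_true, decide_eq_true_eq,
    Bool.not_eq_true', List.any_eq_true, mem_ptsOf, beq_iff_eq]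
  constructor
  · rintro ⟨⟨⟨hin, hjn⟩, hS⟩, hnb⟩
    refine ⟨⟨⟨⟨⟨by omega, hin⟩, by omega⟩, hjn⟩, hS⟩, ?_⟩
    rcases hnb with ((h1 | h2) | h3) | h4
    · obtain ⟨⟨⟨⟨e1, e2⟩, e3⟩, e4⟩, hW⟩ := h1
      exact ⟨((i : Int) + 1, (j : Int)), ⟨e1, e2, e3, e4⟩, hW, by omega⟩
    · obtain ⟨⟨⟨⟨e1, e2⟩, e3⟩, e4⟩, hW⟩ := h2
      exact ⟨((i : Int) - 1, (j : Int)), ⟨e1, e2, e3, e4⟩, hW, by omega⟩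
    · obtain ⟨⟨⟨⟨e1, e2⟩, e3⟩, e4⟩, hW⟩ := h3
      exact ⟨((i : Int), (j : Int) + 1), ⟨e1, e2, e3, e4⟩, hW, by omega⟩
    · obtain ⟨⟨⟨⟨e1, e2⟩, e3⟩, e4⟩, hW⟩ := h4
      exact ⟨((i : Int), (j : Int) - 1), ⟨e1, e2, e3, e4⟩, hW, by omega⟩
  · rintro ⟨⟨⟨⟨⟨h0i, hin⟩, h0j⟩, hjn⟩, hS⟩, x, hxb, hxW, hadj⟩
    refine ⟨⟨⟨hin, hjn⟩, hS⟩, ?_⟩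
    obtain ⟨x1, x2⟩ := x
    simp only at hxb hxW hadj
    obtain ⟨g1, g2, g3, g4⟩ := hxb
    rcases hadj with ((⟨e1, e2⟩ | ⟨e1, e2⟩) | ⟨e1, e2⟩) | ⟨e1, e2⟩
    · have f1 : x1 = (i : Int) - 1 := by omega
      have f2 : x2 = (j : Int) := by omega
      subst f1; subst f2
      exact Or.inl (Or.inl (Or.inr ⟨⟨⟨⟨by omega, by omega⟩, by omega⟩, by omega⟩, hxW⟩))
    · have f1 : x1 = (i : Int) := by omega
      have f2 : x2 = (j : Int) - 1 := by omega
      subst f1; subst f2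
      exact Or.inr ⟨⟨⟨⟨by omega, by omega⟩, by omega⟩, by omega⟩, hxW⟩
    · have f1 : x1 = (i : Int) + 1 := by omega
      have f2 : x2 = (j : Int) := by omega
      subst f1; subst f2
      exact Or.inl (Or.inl (Or.inl ⟨⟨⟨⟨by omega, by omega⟩, by omega⟩, by omega⟩, hxW⟩))
    · have f1 : x1 = (i : Int) := by omega
      have f2 : x2 = (j : Int) + 1 := by omega
      subst f1; subst f2
      exact Or.inl (Or.inr ⟨⟨⟨⟨by omega, by omega⟩, by omega⟩, by omega⟩, hxW⟩)

lemma B_eq_marks (w : List (List String)) (n : Int) :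
    compute_stench_alt w n = applyMarks w (fun i j => marksOf w n (ptsOf n) i j) := by
  have halt : compute_stench_alt w n =
      gmap w (fun i j c =>
        if decide (i < n) && decide (j < n) && !PySem.Str.isIn "S" c &&
            (nbW w n (i + 1) j || nbW w n (i - 1) j || nbW w n i (j + 1) || nbW w n i (j - 1))
        then sApp c else c) := rfl
  rw [halt, applyMarks]
  refine grid_ext (by rw [length_gmap, length_gmap]) ?_ ?_
  · intro i h1
    have hi : i < w.length := by rwa [length_gmap] at h1
    rw [rowlen_gmap w _ i hi, rowlen_gmap w _ i hi]
  · intro i j h1 hj1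
    have hi : i < w.length := by rwa [length_gmap] at h1
    have hj : j < (w[i]).length := by rwa [rowlen_gmap w _ i hi] at hj1
    rw [getElem_gmap w _ i j hi hj, getElem_gmap w _ i j hi hj,
      cond_pointwise w n i j hi hj]

-- ===== VERDICT (by name: the statement is the Claim_ definition above) =====
theorem compute_stench_spec : Claim_equal_compute_stench := by
  intro world n _ hpre
  unfold Spec_compute_stench
  rw [A_eq_marks world n hpre, B_eq_marks world n]
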